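-- pv_equiv track=rewrite | github.com/MinHoon-LEE/Ps_Sql | Programmers/Algorithm/Python/17681/17681.py | convert
-- ===== SOURCE A (Python) =====
-- def convert(num,n):
--     tmp = ''
--     for i in range (n):
--         if (num % 2 == 1):
--             tmp += '#'
--         else:
--             tmp += ' '
--         num = num // 2
--     return tmp[::-1]
-- ===== SOURCE B (Python) =====
-- def convert(num, n):
--     if n <= 0:
--         return ''
--     s = bin(num % (1 << n))[2:].zfill(n)
--     return ''.join('#' if c == '1' else ' ' for c in s)
-- ===== Notes on version B (the rewrite author's own statement) =====
-- stated objective: idiomatic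
-- what changed: Replaced A's per-bit extract/branch/append loop with final string reversal by one masking modulo (num % (1<<n)), a library base-2 conversion bin(), zfill padding and a single character map.
import Mathlib
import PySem

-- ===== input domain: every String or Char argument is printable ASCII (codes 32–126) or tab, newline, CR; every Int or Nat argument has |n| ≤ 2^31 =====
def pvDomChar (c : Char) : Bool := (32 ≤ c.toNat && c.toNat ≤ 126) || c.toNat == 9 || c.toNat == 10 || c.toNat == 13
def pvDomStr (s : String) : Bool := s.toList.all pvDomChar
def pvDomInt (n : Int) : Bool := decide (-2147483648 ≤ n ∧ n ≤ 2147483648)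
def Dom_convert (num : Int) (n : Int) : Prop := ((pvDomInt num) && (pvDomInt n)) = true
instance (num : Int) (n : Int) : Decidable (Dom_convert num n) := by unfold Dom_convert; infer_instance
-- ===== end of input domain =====

-- B replaces A's per-bit extract/branch/append loop + final reversal by one masking mod,
-- a base-2 string conversion, zero-padding and a single character map (objective: idiomatic).

-- ===== PORT A =====
-- for i in range(n): append '#'/' ' by num % 2; num //= 2 ; return tmp[::-1]
def convert (num : Int) (n : Int) : String :=
  let st := (PySem.List.pyRange 0 n 1).foldl
    (fun (st : List Char × Int) (_ : Int) =>
      (st.1 ++ [if PySem.Int.mod st.2 2 = 1 then '#' else ' '], PySem.Int.floordiv st.2 2))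
    ([], num)
  String.mk st.1.reverse    -- tmp[::-1]

-- ===== PORT B =====
-- bin(m)[2:] for m ≥ 0 (digits most-significant first; bin(0)[2:] = "0")
def binGo (m : Nat) : List Char :=
  if h : m = 0 then [] else binGo (m / 2) ++ [if m % 2 = 1 then '1' else '0']
  decreasing_by exact Nat.div_lt_self (by omega) (by omega)

def binStr (m : Nat) : List Char := if m = 0 then ['0'] else binGo m

def convert_alt (num : Int) (n : Int) : String :=
  if n ≤ 0 then "" else
    -- num % (1 << n): Python % with the positive modulus 2^n (exact: PySem.Int.mod)
    let s := binStr (PySem.Int.mod num (2 ^ n.toNat)).toNat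
    let padded := List.replicate (n.toNat - s.length) '0' ++ s   -- .zfill(n)
    String.mk (padded.map (fun c => if c = '1' then '#' else ' '))  -- the join/generator

-- ===== PRECONDITION & SPEC =====
def Spec_convert (num : Int) (n : Int) (out : String) : Prop := out = convert_alt num n
instance (num : Int) (n : Int) (out : String) : Decidable (Spec_convert num n out) := by unfold Spec_convert; infer_instance

-- ===== CLAIM (what is proved, stated in full; the proofs are below) =====
def Claim_equal_convert : Prop := ∀ (num : Int) (n : Int), Dom_convert num n → Spec_convert num n (convert num n)

-- ===== LEMMAS AND PROOFS =====

-- the '#'/' ' bits of m, least significant first, k of them (Nat form of A's loop)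
def lsbN : Nat → Nat → List Char
  | _, 0 => []
  | m, k+1 => (if m % 2 = 1 then '#' else ' ') :: lsbN (m / 2) k

-- Int form matching A's loop body exactly
def lsbI : Int → Nat → List Char
  | _, 0 => []
  | v, k+1 => (if PySem.Int.mod v 2 = 1 then '#' else ' ') :: lsbI (PySem.Int.floordiv v 2) k

theorem foldA_eq_lsbI (l : List Int) (acc : List Char) (v : Int) :
    (l.foldl (fun (st : List Char × Int) (_ : Int) =>
      (st.1 ++ [if PySem.Int.mod st.2 2 = 1 then '#' else ' '], PySem.Int.floordiv st.2 2))
      (acc, v)).1 = acc ++ lsbI v l.length := by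
  induction l generalizing acc v with
  | nil => simp [lsbI]
  | cons x xs ih =>
    simp only [List.foldl_cons, List.length_cons, lsbI]
    rw [ih]
    simp

theorem half_mod (v b : Int) (hb : 0 < b) :
    (v / 2) % b = (v % (2 * b)) / 2 ∧ v % 2 = (v % (2 * b)) % 2 := by
  have h2b : (0:Int) < 2 * b := by omega
  have hdecomp := Int.ediv_add_emod v (2 * b)
  have hr0 : 0 ≤ v % (2 * b) := Int.emod_nonneg v (by omega)
  have hrlt : v % (2 * b) < 2 * b := Int.emod_lt_of_pos v h2b
  set q := v / (2 * b) with hq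
  set r := v % (2 * b) with hr
  have hv : v = r + (b * q) * 2 := by linear_combination -hdecomp
  have hdiv : v / 2 = r / 2 + b * q := by
    rw [hv, Int.add_mul_ediv_right _ _ (by omega : (2:Int) ≠ 0)]
  constructor
  · rw [hdiv, Int.add_mul_emod_self_left]
    exact Int.emod_eq_of_lt (by omega) (by omega)
  · rw [hv, Int.add_mul_emod_self_right]

theorem lsbI_eq_lsbN (k : Nat) (v : Int) :
    lsbI v k = lsbN (v % (2 ^ k : Nat)).toNat k := by
  induction k generalizing v with
  | zero => simp [lsbI, lsbN]
  | succ k ih =>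
    have hb : (0:Int) < (2:Int) ^ k := by positivity
    obtain ⟨hdiv, hmod⟩ := half_mod v ((2:Int) ^ k) hb
    have hcast : ((2 ^ (k+1) : Nat) : Int) = 2 * 2 ^ k := by push_cast; ring
    have hr0 : 0 ≤ v % (2 * 2 ^ k) := Int.emod_nonneg v (by omega)
    have hmod2 : PySem.Int.mod v 2 = v % 2 := PySem.Int.mod_eq_emod_of_pos (by omega)
    have hfd : PySem.Int.floordiv v 2 = v / 2 := PySem.Int.floordiv_eq_ediv_of_pos (by omega)
    show (if PySem.Int.mod v 2 = 1 then '#' else ' ') :: lsbI (PySem.Int.floordiv v 2) k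
        = lsbN (v % (2 ^ (k+1) : Nat)).toNat (k+1)
    rw [hmod2, hfd, ih]
    show _ = (if (v % (2 ^ (k+1) : Nat)).toNat % 2 = 1 then '#' else ' ')
        :: lsbN ((v % (2 ^ (k+1) : Nat)).toNat / 2) k
    have hcast' : (v % (2 ^ (k+1) : Nat)) = v % (2 * 2 ^ k) := by rw [hcast]
    rw [hcast']
    have e1 : (v % 2 = 1) ↔ ((v % (2 * 2 ^ k)).toNat % 2 = 1) := by omega
    have e2 : ((v / 2) % (2 ^ k : Nat)).toNat = (v % (2 * 2 ^ k)).toNat / 2 := by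
      have : ((2 ^ k : Nat) : Int) = (2:Int) ^ k := by push_cast; ring
      rw [this, hdiv]; omega
    rw [e2]
    congr 1
    simp only [e1]

theorem binGo_zero : binGo 0 = [] := by rw [binGo]; simp

theorem binGo_ne (m : Nat) (h : m ≠ 0) :
    binGo m = binGo (m / 2) ++ [if m % 2 = 1 then '1' else '0'] := by
  rw [binGo]; rw [dif_neg h]

theorem binGo_len (k : Nat) : ∀ m : Nat, m < 2 ^ k → (binGo m).length ≤ k := by
  induction k with
  | zero => intro m hm; interval_cases m; simp [binGo_zero]
  | succ k ih =>
    intro m hm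
    by_cases h : m = 0
    · simp [h, binGo_zero]
    · rw [binGo_ne m h]
      have hlt : m / 2 < 2 ^ k := by rw [pow_succ] at hm; omega
      have := ih (m / 2) hlt
      simp
      omega

-- character translation of B's join
theorem lsbN_reverse (k : Nat) : ∀ m : Nat, m < 2 ^ k →
    (lsbN m k).reverse
      = (List.replicate (k - (binGo m).length) '0' ++ binGo m).map
          (fun c => if c = '1' then '#' else ' ') := by
  induction k with
  | zero => intro m hm; interval_cases m; simp [lsbN, binGo_zero]
  | succ k ih =>
    intro m hm
    have hm2 : m / 2 < 2 ^ k := by rw [pow_succ] at hm; omega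
    have ihm := ih (m / 2) hm2
    show ((if m % 2 = 1 then '#' else ' ') :: lsbN (m / 2) k).reverse = _
    rw [List.reverse_cons, ihm]
    by_cases h : m = 0
    · subst h
      simp only [Nat.zero_div, binGo_zero, List.append_nil, List.length_nil, Nat.sub_zero]
      rw [List.replicate_succ' (n := k)]
      simp
    · rw [binGo_ne m h]
      have hL : (binGo (m / 2)).length ≤ k := binGo_len k (m / 2) hm2
      have hlen : k + 1 - ((binGo (m / 2)).length + 1) = k - (binGo (m / 2)).length := by omega
      simp only [List.length_append, List.length_cons, List.length_nil, Nat.zero_add, hlen,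
        ← List.append_assoc, List.map_append]
      congr 1
      by_cases hp : m % 2 = 1 <;> simp [hp]

theorem pad_binStr (n : Nat) (m : Nat) (hn : 1 ≤ n) :
    List.replicate (n - (binStr m).length) '0' ++ binStr m
      = List.replicate (n - (binGo m).length) '0' ++ binGo m := by
  by_cases h : m = 0
  · subst h
    rw [binStr, if_pos rfl, binGo_zero]
    simp only [List.length_cons, List.length_nil, Nat.zero_add, Nat.sub_zero, List.append_nil]
    have hrw : n = (n - 1) + 1 := by omega
    rw [hrw, List.replicate_succ' (n := n - 1)]
    simp
  · rw [binStr, if_neg h]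

-- ===== VERDICT (by name: the statement is the Claim_ definition above) =====
theorem convert_spec : Claim_equal_convert := by
  intro num n _dom
  show convert num n = convert_alt num n
  by_cases hn : n ≤ 0
  · simp only [convert, convert_alt, if_pos hn]
    rw [PySem.List.pyRange_one_eq_nil (by omega)]
    rfl
  · simp only [convert, convert_alt, if_neg hn]
    have hk1 : 1 ≤ n.toNat := by omega
    have hb : (0:Int) < ((2 ^ n.toNat : Nat) : Int) := by positivity
    have hmodE : PySem.Int.mod num (2 ^ n.toNat) = num % ((2 ^ n.toNat : Nat) : Int) := by
      have h := PySem.Int.mod_eq_emod_of_pos (a := num) (b := ((2 ^ n.toNat : Nat) : Int)) hb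
      rw [← h]; norm_cast
    rw [foldA_eq_lsbI, PySem.List.length_pyRange_one]
    have hlen : ((n - 0).toNat) = n.toNat := by omega
    rw [hlen, lsbI_eq_lsbN]
    simp only [List.nil_append]
    have hm : (num % ((2 ^ n.toNat : Nat) : Int)).toNat < 2 ^ n.toNat := by
      have h1 : num % ((2 ^ n.toNat : Nat) : Int) < ((2 ^ n.toNat : Nat) : Int) :=
        Int.emod_lt_of_pos num (by omega)
      omega
    rw [lsbN_reverse n.toNat _ hm, hmodE, pad_binStr _ _ hk1]
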